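-- pv_equiv track=rewrite | github.com/izodam/Algorithm | 백준/Silver/15118. Halfway/Halfway.py | find_halfway_point
-- ===== SOURCE A (Python) =====
-- def find_halfway_point(n):
--     total_comparisons = n * (n - 1) // 2
--     half_comparisons = (total_comparisons + 1) // 2  # (total + 1) // 2 to handle both odd and even cases
--
--     left, right = 1, n
--     while left < right:
--         mid = (left + right) // 2
--         # Calculate comparisons made by mid
--         comparisons = mid * (2 * n - mid - 1) // 2
--         if comparisons < half_comparisons:
--             left = mid + 1
--         else:
--             right = mid
--
--     return left
-- ===== SOURCE B (Python) =====
-- def _isqrt(m):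
--     # integer square root by Newton's method (no imports)
--     if m < 2:
--         return m
--     x = m
--     y = (x + m // x) // 2
--     while y < x:
--         x = y
--         y = (x + m // x) // 2
--     return x
--
--
-- def find_halfway_point(n):
--     # Closed form: the first pass k at which the cumulative comparison count
--     # reaches half is n - m, where m is the largest integer with
--     # m*(m-1) <= 2*(total//2)  (comparisons that may still remain afterwards).
--     if n <= 1:
--         return 1
--     total = n * (n - 1) // 2
--     cap = 2 * (total // 2)
--     m = (1 + _isqrt(1 + 4 * cap)) // 2
--     return n - m
-- ===== Notes on version B (the rewrite author's own statement) =====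
-- stated objective: alternative
-- what changed: Replaces A's binary search over pass indices by a closed form: the answer is n minus the largest m with m*(m-1) <= 2*(total//2), computed with a hand-written Newton integer square root.
import Mathlib
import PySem

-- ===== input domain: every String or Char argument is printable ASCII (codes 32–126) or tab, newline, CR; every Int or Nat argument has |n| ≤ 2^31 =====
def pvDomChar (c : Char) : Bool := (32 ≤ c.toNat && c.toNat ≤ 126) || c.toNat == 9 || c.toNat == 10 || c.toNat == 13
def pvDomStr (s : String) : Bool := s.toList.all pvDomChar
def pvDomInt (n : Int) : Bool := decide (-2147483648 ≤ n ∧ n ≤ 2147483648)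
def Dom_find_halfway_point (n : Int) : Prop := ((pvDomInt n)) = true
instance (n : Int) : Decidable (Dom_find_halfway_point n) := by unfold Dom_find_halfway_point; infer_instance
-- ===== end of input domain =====

-- B replaces A's binary search by a closed form: the answer is n minus the largest m with
-- m*(m-1) <= 2*(total//2), computed via a hand-written Newton integer square root (alternative).

-- ===== PORT A =====
-- A's 'while left < right' binary-search loop, as recursion on right - left
def pvBsearchA (n h left right : Int) : Int :=
  if hlt : left < right then
    let mid := PySem.Int.floordiv (left + right) 2
    let comparisons := PySem.Int.floordiv (mid * (2 * n - mid - 1)) 2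
    if comparisons < h then pvBsearchA n h (mid + 1) right
    else pvBsearchA n h left mid
  else left
termination_by (right - left).toNat
decreasing_by
  · have h1 : left * 2 ≤ left + right := by omega
    have := (PySem.Int.le_floordiv_iff_mul_le (by omega)).mpr h1
    omega
  · have h1 : left + right < right * 2 := by omega
    have h2 := (PySem.Int.floordiv_lt_iff_lt_mul (by omega)).mpr h1
    have h3 : left * 2 ≤ left + right := by omega
    have := (PySem.Int.le_floordiv_iff_mul_le (by omega)).mpr h3
    omega

def find_halfway_point (n : Int) : Int :=
  let total_comparisons := PySem.Int.floordiv (n * (n - 1)) 2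
  let half_comparisons := PySem.Int.floordiv (total_comparisons + 1) 2
  pvBsearchA n half_comparisons 1 n

-- ===== PORT B =====
-- Source B's 'while y < x' Newton loop; the '0 ≤ y' conjunct is a totality guard only
-- (it holds on every call the port makes, where 2 ≤ m and 1 ≤ x)
def pvIsqrtLoop (m x : Int) : Int :=
  let y := PySem.Int.floordiv (x + PySem.Int.floordiv m x) 2
  if _hyx : 0 ≤ y ∧ y < x then pvIsqrtLoop m y else x
termination_by x.toNat
decreasing_by omega

def pvIsqrt (m : Int) : Int :=
  if m < 2 then m else pvIsqrtLoop m m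

def find_halfway_point_alt (n : Int) : Int :=
  if n ≤ 1 then 1
  else
    let total := PySem.Int.floordiv (n * (n - 1)) 2
    let cap := 2 * PySem.Int.floordiv total 2
    let m := PySem.Int.floordiv (1 + pvIsqrt (1 + 4 * cap)) 2
    n - m

-- ===== PRECONDITION & SPEC =====
def Spec_find_halfway_point (n : Int) (out : Int) : Prop := out = find_halfway_point_alt n
instance (n : Int) (out : Int) : Decidable (Spec_find_halfway_point n out) := by unfold Spec_find_halfway_point; infer_instance

-- ===== CLAIM (what is proved, stated in full; the proofs are below) =====
def Claim_equal_find_halfway_point : Prop := ∀ (n : Int), Dom_find_halfway_point n → Spec_find_halfway_point n (find_halfway_point n)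

-- ===== LEMMAS AND PROOFS =====

-- comparisons made by the first k bubble-sort passes, as both Pythons compute it
def pvCmp (n k : Int) : Int := PySem.Int.floordiv (k * (2 * n - k - 1)) 2

theorem pvCmp_double (n k : Int) : 2 * pvCmp n k = k * (2 * n - k - 1) := by
  unfold pvCmp
  rw [PySem.Int.floordiv_eq_ediv_of_pos (by norm_num)]
  obtain ⟨t, ht⟩ : ∃ t, k * (2 * n - k - 1) = 2 * t := by
    rcases Int.even_or_odd k with ⟨t, ht⟩ | ⟨t, ht⟩
    · exact ⟨t * (2 * n - k - 1), by rw [ht]; ring⟩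
    · exact ⟨k * (n - t - 1), by rw [ht]; ring⟩
  rw [ht]; omega

theorem pvCmp_mono (n i j : Int) (hij : i ≤ j) (hj : j ≤ n) :
    pvCmp n i ≤ pvCmp n j := by
  rcases eq_or_lt_of_le hij with rfl | hlt
  · exact le_refl _
  · have hd1 := pvCmp_double n i
    have hd2 := pvCmp_double n j
    have hnn : 0 ≤ (j - i) * (2 * n - i - j - 1) :=
      mul_nonneg (by omega) (by omega)
    nlinarith [hnn]

-- the binary search lands on an r with h ≤ pvCmp n r and (r = 1 or pvCmp n (r-1) < h)
theorem pvBsearchA_char (n h : Int) :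
    ∀ left right : Int, 1 ≤ left → left ≤ right → right ≤ n →
    h ≤ pvCmp n right → (left = 1 ∨ pvCmp n (left - 1) < h) →
    1 ≤ pvBsearchA n h left right ∧ pvBsearchA n h left right ≤ n ∧
    h ≤ pvCmp n (pvBsearchA n h left right) ∧
    (pvBsearchA n h left right = 1 ∨ pvCmp n (pvBsearchA n h left right - 1) < h) := by
  have key : ∀ N : Nat, ∀ left right : Int, (right - left).toNat ≤ N →
      1 ≤ left → left ≤ right → right ≤ n →
      h ≤ pvCmp n right → (left = 1 ∨ pvCmp n (left - 1) < h) →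
      1 ≤ pvBsearchA n h left right ∧ pvBsearchA n h left right ≤ n ∧
      h ≤ pvCmp n (pvBsearchA n h left right) ∧
      (pvBsearchA n h left right = 1 ∨ pvCmp n (pvBsearchA n h left right - 1) < h) := by
    intro N
    induction N with
    | zero =>
      intro left right hN h1 h2 h3 h4 h5
      have hlr : left = right := by omega
      rw [pvBsearchA, dif_neg (by omega)]
      subst hlr
      exact ⟨h1, h3, h4, h5⟩
    | succ N ih =>
      intro left right hN h1 h2 h3 h4 h5
      by_cases hlt : left < right
      · have hmid1 : left * 2 ≤ left + right := by omega
        have hmidlo := (PySem.Int.le_floordiv_iff_mul_le (a := left + right) (q := left) (by omega)).mpr hmid1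
        have hmid2 : left + right < right * 2 := by omega
        have hmidhi := (PySem.Int.floordiv_lt_iff_lt_mul (a := left + right) (q := right) (by omega)).mpr hmid2
        set mid := PySem.Int.floordiv (left + right) 2 with hmiddef
        rw [pvBsearchA, dif_pos hlt]
        simp only [← hmiddef]
        by_cases hcmp : PySem.Int.floordiv (mid * (2 * n - mid - 1)) 2 < h
        · rw [if_pos hcmp]
          exact ih (mid + 1) right (by omega) (by omega) (by omega) h3 h4
            (Or.inr (by simpa [pvCmp] using hcmp))
        · rw [if_neg hcmp]
          exact ih left mid (by omega) h1 (by omega) (by omega)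
            (by simpa [pvCmp] using not_lt.mp hcmp) h5
      · rw [pvBsearchA, dif_neg hlt]
        have : left = right := by omega
        subst this
        exact ⟨h1, h3, h4, h5⟩
  intro left right
  exact key (right - left).toNat left right (le_refl _)

-- Newton's loop: if m < (x+1)^2 then the result s satisfies s^2 ≤ m < (s+1)^2
theorem pvIsqrtLoop_correct (m : Int) (hm : 2 ≤ m) :
    ∀ x : Int, 1 ≤ x → m < (x + 1) * (x + 1) →
    1 ≤ pvIsqrtLoop m x ∧ pvIsqrtLoop m x * pvIsqrtLoop m x ≤ m ∧
    m < (pvIsqrtLoop m x + 1) * (pvIsqrtLoop m x + 1) := by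
  have key : ∀ N : Nat, ∀ x : Int, x.toNat ≤ N → 1 ≤ x → m < (x + 1) * (x + 1) →
      1 ≤ pvIsqrtLoop m x ∧ pvIsqrtLoop m x * pvIsqrtLoop m x ≤ m ∧
      m < (pvIsqrtLoop m x + 1) * (pvIsqrtLoop m x + 1) := by
    intro N
    induction N with
    | zero => intro x hx h1 _; omega
    | succ N ih =>
      intro x hxN h1 hinv
      have hq : PySem.Int.floordiv m x = m / x :=
        PySem.Int.floordiv_eq_ediv_of_pos (by omega)
      set q := m / x with hqdef
      have hqr : q * x + m % x = m := Int.ediv_add_emod' m x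
      have hr0 : 0 ≤ m % x := Int.emod_nonneg m (by omega)
      have hrx : m % x < x := Int.emod_lt_of_pos m (by omega)
      have hy : PySem.Int.floordiv (x + PySem.Int.floordiv m x) 2 = (x + q) / 2 := by
        rw [hq, PySem.Int.floordiv_eq_ediv_of_pos (by norm_num)]
      set y := (x + q) / 2 with hydef
      have hy2 : 2 * y ≤ x + q ∧ x + q ≤ 2 * y + 1 := by omega
      have hq1 : x = 1 → q = m := by intro h; simp [hqdef, h]
      have hq0 : 0 ≤ q := Int.ediv_nonneg (by omega) (by omega)
      have hy1 : 1 ≤ y := by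
        rcases eq_or_lt_of_le h1 with h | h
        · have := hq1 h.symm; omega
        · omega
      have hsq : (x + q + 1) * (x + q + 1) ≤ (2 * (y + 1)) * (2 * (y + 1)) :=
        mul_self_le_mul_self (by omega) (by omega)
      have hstep : 4 * m < (x + q + 1) * (x + q + 1) := by
        nlinarith [sq_nonneg (x - q - 1)]
      have hinv' : m < (y + 1) * (y + 1) := by nlinarith
      rw [pvIsqrtLoop]
      simp only [hy]
      by_cases hc : 0 ≤ y ∧ y < x
      · rw [dif_pos hc]
        exact ih y (by omega) hy1 hinv'
      · rw [dif_neg hc]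
        have hyx : x ≤ y := by omega
        have hqx : x ≤ q := by omega
        refine ⟨h1, ?_, hinv⟩
        nlinarith
  intro x
  exact key x.toNat x (le_refl _)

theorem pvIsqrt_correct (m : Int) (hm : 0 ≤ m) :
    0 ≤ pvIsqrt m ∧ pvIsqrt m * pvIsqrt m ≤ m ∧ m < (pvIsqrt m + 1) * (pvIsqrt m + 1) := by
  unfold pvIsqrt
  by_cases h : m < 2
  · rw [if_pos h]
    interval_cases m <;> norm_num
  · rw [if_neg h]
    have := pvIsqrtLoop_correct m (by omega) m (by omega) (by nlinarith)
    exact ⟨by omega, this.2.1, this.2.2⟩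

-- ===== VERDICT (by name: the statement is the Claim_ definition above) =====
theorem find_halfway_point_spec : Claim_equal_find_halfway_point := by
  intro n _
  unfold Spec_find_halfway_point find_halfway_point find_halfway_point_alt
  by_cases hn : n ≤ 1
  · rw [if_pos hn, pvBsearchA, dif_neg (by omega)]
  · rw [if_neg hn]
    push_neg at hn  -- 1 < n
    -- total and half, in exact arithmetic
    have htotal : PySem.Int.floordiv (n * (n - 1)) 2 = pvCmp n n := by
      unfold pvCmp; congr 1; ring
    set total := PySem.Int.floordiv (n * (n - 1)) 2 with htotaldef
    have h2T : 2 * total = n * (n - 1) := by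
      rw [htotal, pvCmp_double]; ring
    have htpos : 1 ≤ total := by nlinarith
    have hhalf : PySem.Int.floordiv (total + 1) 2 = (total + 1) / 2 :=
      PySem.Int.floordiv_eq_ediv_of_pos (by norm_num)
    set h := (total + 1) / 2 with hhdef
    have hcapdiv : PySem.Int.floordiv total 2 = total / 2 :=
      PySem.Int.floordiv_eq_ediv_of_pos (by norm_num)
    set cap := 2 * (total / 2) with hcapdef
    have hcap : cap = 2 * total - 2 * h := by omega
    have hcap0 : 0 ≤ cap ∧ cap < 2 * total := by omega
    -- the square root and the largest m with m*(m-1) ≤ cap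
    obtain ⟨hs0, hs1, hs2⟩ := pvIsqrt_correct (1 + 4 * cap) (by omega)
    set s := pvIsqrt (1 + 4 * cap) with hsdef
    have hs1' : 1 ≤ s := by by_contra hc; push_neg at hc; nlinarith
    have hmdiv : PySem.Int.floordiv (1 + s) 2 = (1 + s) / 2 :=
      PySem.Int.floordiv_eq_ediv_of_pos (by norm_num)
    set m0 := (1 + s) / 2 with hm0def
    have hm0b : 2 * m0 ≤ 1 + s ∧ 1 + s ≤ 2 * m0 + 1 := by omega
    have hm01 : 1 ≤ m0 := by omega
    have hlow : m0 * (m0 - 1) ≤ cap := by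
      have := mul_self_le_mul_self (a := 2 * m0 - 1) (b := s) (by omega) (by omega)
      nlinarith
    have hhigh : cap < (m0 + 1) * m0 := by
      have := mul_self_le_mul_self (a := s + 1) (b := 2 * m0 + 1) (by omega) (by omega)
      nlinarith
    have hm0n : m0 ≤ n - 1 := by
      by_contra hc; push_neg at hc
      have : n * (n - 1) ≤ m0 * (m0 - 1) := by nlinarith
      omega
    -- translate pvCmp through cap
    have htrans : ∀ k : Int, 2 * pvCmp n k = 2 * total - (n - k) * (n - k - 1) := by
      intro k
      have := pvCmp_double n k
      nlinarith [this, h2T]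
    -- B's value n - m0 has the binary search's characterization
    have hk0cmp : h ≤ pvCmp n (n - m0) := by
      have := htrans (n - m0)
      have he : (n - (n - m0)) * (n - (n - m0) - 1) = m0 * (m0 - 1) := by ring
      rw [he] at this
      omega
    have hk0prev : pvCmp n (n - m0 - 1) < h := by
      have := htrans (n - m0 - 1)
      have he : (n - (n - m0 - 1)) * (n - (n - m0 - 1) - 1) = (m0 + 1) * m0 := by ring
      rw [he] at this
      omega
    -- A's binary search
    have hAn : h ≤ pvCmp n n := by rw [← htotal]; omega
    obtain ⟨hr1, hrn, hrc, hrp⟩ :=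
      pvBsearchA_char n h 1 n (le_refl _) (by omega) (le_refl _) hAn (Or.inl rfl)
    set r := pvBsearchA n h 1 n with hrdef
    -- uniqueness of the crossing point
    have hgoal : r = n - m0 := by
      rcases lt_trichotomy r (n - m0) with hc | hc | hc
      · have hmono := pvCmp_mono n r (n - m0 - 1) (by omega) (by omega)
        omega
      · exact hc
      · rcases hrp with hr1' | hrprev
        · omega
        · have hmono := pvCmp_mono n (n - m0) (r - 1) (by omega) (by omega)
          omega
    simp only [hhalf, hcapdiv, ← hcapdef, ← hsdef, hmdiv, ← hrdef]
    exact hgoal
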